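-- pv_equiv track=rewrite | github.com/WildStriker/advent_of_code_2023 | advent_of_code/day_13/puzzle/reflection.py | _check_reflections
-- ===== SOURCE A (Python) =====
-- def _check_reflections(visuals, left_index, right_index):
--     if left_index < 0:
--         return True
--
--     if right_index >= len(visuals):
--         return True
--
--     if visuals[left_index] != visuals[right_index]:
--         return False
--
--     return _check_reflections(visuals, left_index-1, right_index + 1)
-- ===== SOURCE B (Python) =====
-- def _check_reflections(visuals, left_index, right_index):
--     n = len(visuals)
--     while left_index >= 0 and right_index < n:
--         if visuals[left_index] != visuals[right_index]:
--             return False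
--         left_index -= 1
--         right_index += 1
--     return True
-- ===== Notes on version B (the rewrite author's own statement) =====
-- stated objective: idiomatic
-- what changed: Replaced the tail recursion (one stack frame per mirrored row pair) with an explicit iterative while loop over two moving pointers, avoiding Python call overhead and recursion-depth limits.
import Mathlib
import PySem

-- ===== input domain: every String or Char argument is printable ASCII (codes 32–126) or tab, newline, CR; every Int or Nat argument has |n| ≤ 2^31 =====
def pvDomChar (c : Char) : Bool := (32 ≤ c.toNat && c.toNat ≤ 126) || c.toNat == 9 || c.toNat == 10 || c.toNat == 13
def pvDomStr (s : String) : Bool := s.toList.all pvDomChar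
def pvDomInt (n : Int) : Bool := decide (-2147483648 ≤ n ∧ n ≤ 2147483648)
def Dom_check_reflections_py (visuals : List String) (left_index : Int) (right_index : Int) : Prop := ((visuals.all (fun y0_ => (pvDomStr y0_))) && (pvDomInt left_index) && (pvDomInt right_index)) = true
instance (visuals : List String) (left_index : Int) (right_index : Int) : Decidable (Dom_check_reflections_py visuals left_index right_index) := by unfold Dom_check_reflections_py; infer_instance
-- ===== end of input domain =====

-- B replaces A's tail recursion by an explicit two-pointer while loop (same return value; objective: idiomatic).


-- ===== PORT A =====
-- A: early-return recursion; the two boundary guards first, then the comparison, then recurse.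
-- Python indexing visuals[i] is PySem.List.pyGet? (negative wraparound; none = IndexError, excluded by Pre_).
def check_reflections_py (visuals : List String) (left_index : Int) (right_index : Int) : Bool :=
  if left_index < 0 then true
  else if right_index ≥ (visuals.length : Int) then true
  else
    match PySem.List.pyGet? visuals left_index, PySem.List.pyGet? visuals right_index with
    | some a, some b =>
        if a ≠ b then false
        else check_reflections_py visuals (left_index - 1) (right_index + 1)
    | _, _ => false   -- Python raises IndexError here; outside Pre_
termination_by ((visuals.length : Int) - right_index).toNat
decreasing_by omega

-- ===== PORT B =====
-- B: while loop over two moving pointers; the recursion below is the loop (state = the two pointers).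
def check_reflections_py_alt (visuals : List String) (left_index : Int) (right_index : Int) : Bool :=
  let n : Int := visuals.length
  if 0 ≤ left_index ∧ right_index < n then
    if PySem.List.pyGet? visuals left_index ≠ PySem.List.pyGet? visuals right_index then false
    else check_reflections_py_alt visuals (left_index - 1) (right_index + 1)
  else true
termination_by ((visuals.length : Int) - right_index).toNat
decreasing_by omega

-- ===== PRECONDITION & SPEC =====
-- Pre_ excludes exactly the inputs where Python A raises IndexError: a comparison step is reached
-- (left_index ≥ 0 and right_index < len) with left_index ≥ len or right_index < -len.
def Pre_check_reflections_py (visuals : List String) (left_index : Int) (right_index : Int) : Prop :=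
  left_index < 0 ∨ right_index ≥ (visuals.length : Int) ∨
    (left_index < (visuals.length : Int) ∧ -(visuals.length : Int) ≤ right_index)
instance (visuals : List String) (left_index : Int) (right_index : Int) : Decidable (Pre_check_reflections_py visuals left_index right_index) := by unfold Pre_check_reflections_py; infer_instance

def pvWitness_check_reflections_py : List String × Int × Int := (["ab", "cd", "cd", "ab"], 1, 2)

def Spec_check_reflections_py (visuals : List String) (left_index : Int) (right_index : Int) (out : Bool) : Prop := out = check_reflections_py_alt visuals left_index right_index
instance (visuals : List String) (left_index : Int) (right_index : Int) (out : Bool) : Decidable (Spec_check_reflections_py visuals left_index right_index out) := by unfold Spec_check_reflections_py; infer_instance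

-- ===== CLAIM (what is proved, stated in full; the proofs are below) =====
def Claim_equal_check_reflections_py : Prop := ∀ (visuals : List String) (left_index : Int) (right_index : Int), Dom_check_reflections_py visuals left_index right_index → Pre_check_reflections_py visuals left_index right_index → Spec_check_reflections_py visuals left_index right_index (check_reflections_py visuals left_index right_index)

-- ===== LEMMAS AND PROOFS =====

-- Under Pre_ the two ports unfold to the same computation; the recursive call preserves Pre_.
theorem check_reflections_eq (visuals : List String) (left_index right_index : Int)
    (hpre : Pre_check_reflections_py visuals left_index right_index) :
    check_reflections_py visuals left_index right_index
      = check_reflections_py_alt visuals left_index right_index := by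
  unfold check_reflections_py check_reflections_py_alt
  by_cases hl : left_index < 0
  · simp [hl]
  · by_cases hr : right_index ≥ (visuals.length : Int)
    · simp [hl, hr]
    · -- comparison step is reached: Pre_ gives both indices in range
      have hcond : 0 ≤ left_index ∧ right_index < (visuals.length : Int) := by
        constructor <;> omega
      have hrange : left_index < (visuals.length : Int) ∧
          -(visuals.length : Int) ≤ right_index := by
        rcases hpre with h | h | h <;> omega
      obtain ⟨a, ha⟩ : ∃ a, PySem.List.pyGet? visuals left_index = some a := by
        have hne : PySem.List.pyGet? visuals left_index ≠ none := by
          rw [Ne, PySem.List.pyGet?_eq_none_iff]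
          simp [PySem.Raise.InRange]; omega
        exact Option.ne_none_iff_exists'.mp hne
      obtain ⟨b, hb⟩ : ∃ b, PySem.List.pyGet? visuals right_index = some b := by
        have hne : PySem.List.pyGet? visuals right_index ≠ none := by
          rw [Ne, PySem.List.pyGet?_eq_none_iff]
          simp [PySem.Raise.InRange]; omega
        exact Option.ne_none_iff_exists'.mp hne
      have hrec := check_reflections_eq visuals (left_index - 1) (right_index + 1)
        (by unfold Pre_check_reflections_py; right; right; constructor <;> omega)
      simp [hl, hr, hcond, ha, hb]
      by_cases hab : a = b <;> simp [hab, hrec]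
termination_by ((visuals.length : Int) - right_index).toNat
decreasing_by omega

-- ===== VERDICT (by name: the statement is the Claim_ definition above) =====
theorem check_reflections_py_spec : Claim_equal_check_reflections_py := by
  intro visuals li ri _ hpre
  unfold Spec_check_reflections_py
  exact check_reflections_eq visuals li ri hpre
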